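-- pv_equiv track=rewrite | github.com/Rafaaa-Student/Integrated-Discord-Bot-Ecosystem-with-Flask-Web-Dashboard-Automated-Data-Scraping | BOT.py | ambil_badge
-- ===== SOURCE A (Python) =====
-- LEVEL_BADGES = {
--     1: "🌱 Newbie",
--     5: "🍃 Fresh Starter",
--     10: "🌿 Green Explorer",
--     20: "🌼 Nature Supporter",
--     30: "🌲 Eco Enthusiast",
--     40: "🌾 Sustainable Seeker",
--     50: "🌍 Environmental Hero",
--     60: "🔥 Climate Advocate",
--     70: "⚡ Eco Warrior",
--     80: "🌀 Planet Protector",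
--     90: "💎 Earth Guardian",
--     100: "🏆 Legendary Green Champion"
-- }
--
-- def hitung_level(xp):
--     return min(xp // 5 + 1, 100)
--
-- def ambil_badge(xp):
--     level = hitung_level(xp)
--     badge = ""
--     for batas, nama in sorted(LEVEL_BADGES.items()):
--         if level >= batas:
--             badge = nama
--         else:
--             break
--     return badge
-- ===== SOURCE B (Python) =====
-- THRESHOLDS = [1, 5, 10, 20, 30, 40, 50, 60, 70, 80, 90, 100]
-- NAMES = [
--     "🌱 Newbie", "🍃 Fresh Starter", "🌿 Green Explorer", "🌼 Nature Supporter",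
--     "🌲 Eco Enthusiast", "🌾 Sustainable Seeker", "🌍 Environmental Hero",
--     "🔥 Climate Advocate", "⚡ Eco Warrior", "🌀 Planet Protector",
--     "💎 Earth Guardian", "🏆 Legendary Green Champion",
-- ]
--
-- def ambil_badge(xp):
--     level = min(xp // 5 + 1, 100)
--     # binary search: lo = number of thresholds <= level (bisect_right)
--     lo, hi = 0, len(THRESHOLDS)
--     while lo < hi:
--         mid = (lo + hi) // 2
--         if level < THRESHOLDS[mid]:
--             hi = mid
--         else:
--             lo = mid + 1
--     return "" if lo == 0 else NAMES[lo - 1]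
-- ===== Notes on version B (the rewrite author's own statement) =====
-- stated objective: alternative
-- what changed: Replaced A's accumulate-until-break linear scan over the sorted badge dict with a binary search (bisect_right by hand) over precomputed parallel threshold/name tables, returning names[idx-1] or '' at idx==0.
import Mathlib
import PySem

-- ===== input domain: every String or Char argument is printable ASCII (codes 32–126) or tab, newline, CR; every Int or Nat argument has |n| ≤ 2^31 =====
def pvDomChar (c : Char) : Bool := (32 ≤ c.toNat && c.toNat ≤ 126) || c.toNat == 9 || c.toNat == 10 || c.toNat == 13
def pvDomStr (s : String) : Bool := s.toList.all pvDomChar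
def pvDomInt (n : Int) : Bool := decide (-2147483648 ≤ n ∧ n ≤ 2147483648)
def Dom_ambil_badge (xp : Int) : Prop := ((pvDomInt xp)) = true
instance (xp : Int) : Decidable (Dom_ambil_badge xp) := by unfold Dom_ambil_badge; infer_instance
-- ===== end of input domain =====

-- B replaces A's accumulate-until-break scan of the sorted badge dict with a binary search
-- over precomputed parallel threshold/name tables (objective: alternative / idiomatic).

-- ===== PORT A =====
-- LEVEL_BADGES.items() as an association list in insertion order
def itemsList : List (Int × String) :=
  [(1, "🌱 Newbie"),
    (5, "🍃 Fresh Starter"),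
    (10, "🌿 Green Explorer"),
    (20, "🌼 Nature Supporter"),
    (30, "🌲 Eco Enthusiast"),
    (40, "🌾 Sustainable Seeker"),
    (50, "🌍 Environmental Hero"),
    (60, "🔥 Climate Advocate"),
    (70, "⚡ Eco Warrior"),
    (80, "🌀 Planet Protector"),
    (90, "💎 Earth Guardian"),
    (100, "🏆 Legendary Green Champion")]

def hitung_level (xp : Int) : Int := min (PySem.Int.floordiv xp 5 + 1) 100

-- the for-loop with break: accumulator `badge`
def loopA (level : Int) : List (Int × String) → String → String
  | [], badge => badge
  | (batas, nama) :: rest, badge =>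
      if level ≥ batas then loopA level rest nama else badge

-- sorted(LEVEL_BADGES.items()): keys are distinct, so Python's tuple order equals ordering by key
def ambil_badge (xp : Int) : String :=
  loopA (hitung_level xp) (PySem.List.sorted itemsList (fun p => p.1)) ""

-- ===== PORT B =====
def thresholdsB : List Int := [1, 5, 10, 20, 30, 40, 50, 60, 70, 80, 90, 100]

def namesB : List String :=
  ["🌱 Newbie",
    "🍃 Fresh Starter",
    "🌿 Green Explorer",
    "🌼 Nature Supporter",
    "🌲 Eco Enthusiast",
    "🌾 Sustainable Seeker",
    "🌍 Environmental Hero",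
    "🔥 Climate Advocate",
    "⚡ Eco Warrior",
    "🌀 Planet Protector",
    "💎 Earth Guardian",
    "🏆 Legendary Green Champion"]

-- the while-loop of Source B; lo/hi stay in [0, 12] so ℕ is exact; THRESHOLDS[mid] always in range
def bsLoop (level : Int) (lo hi : ℕ) : ℕ :=
  if h : lo < hi then
    let mid := (lo + hi) / 2
    if level < thresholdsB.getD mid 0 then bsLoop level lo mid
    else bsLoop level (mid + 1) hi
  else lo
termination_by hi - lo
decreasing_by all_goals omega

def ambil_badge_alt (xp : Int) : String :=
  let level := min (PySem.Int.floordiv xp 5 + 1) 100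
  let lo := bsLoop level 0 12
  if lo = 0 then "" else namesB.getD (lo - 1) ""

-- ===== PRECONDITION & SPEC =====
def Spec_ambil_badge (xp : Int) (out : String) : Prop := out = ambil_badge_alt xp
instance (xp : Int) (out : String) : Decidable (Spec_ambil_badge xp out) := by unfold Spec_ambil_badge; infer_instance

-- ===== CLAIM (what is proved, stated in full; the proofs are below) =====
def Claim_equal_ambil_badge : Prop := ∀ (xp : Int), Dom_ambil_badge xp → Spec_ambil_badge xp (ambil_badge xp)

-- ===== LEMMAS AND PROOFS =====

-- the dict is already sorted by key, so sorted() is the identity on it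
lemma sorted_items : PySem.List.sorted itemsList (fun p => p.1) = itemsList :=
  PySem.List.sorted_eq_self_of_pairwise _ _ (by decide)

-- both programs agree for every level value l
lemma core_eq (l : Int) :
    loopA l itemsList "" =
      (let lo := bsLoop l 0 12; if lo = 0 then "" else namesB.getD (lo - 1) "") := by
  by_cases h0 : l < 1
  ·
    simp [loopA, bsLoop, thresholdsB, namesB, itemsList, show l < (1:Int) from by omega, show ¬ (1:Int) ≤ l from by omega, show l < (5:Int) from by omega, show ¬ (5:Int) ≤ l from by omega, show l < (10:Int) from by omega, show ¬ (10:Int) ≤ l from by omega, show l < (20:Int) from by omega, show ¬ (20:Int) ≤ l from by omega, show l < (30:Int) from by omega, show ¬ (30:Int) ≤ l from by omega, show l < (40:Int) from by omega, show ¬ (40:Int) ≤ l from by omega, show l < (50:Int) from by omega, show ¬ (50:Int) ≤ l from by omega, show l < (60:Int) from by omega, show ¬ (60:Int) ≤ l from by omega, show l < (70:Int) from by omega, show ¬ (70:Int) ≤ l from by omega, show l < (80:Int) from by omega, show ¬ (80:Int) ≤ l from by omega, show l < (90:Int) from by omega, show ¬ (90:Int) ≤ l from by omega, show l < (100:Int)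 from by omega, show ¬ (100:Int) ≤ l from by omega]
  by_cases h1 : l < 5
  ·
    simp [loopA, bsLoop, thresholdsB, namesB, itemsList, show (1:Int) ≤ l from by omega, show ¬ l < (1:Int) from by omega, show l < (5:Int) from by omega, show ¬ (5:Int) ≤ l from by omega, show l < (10:Int) from by omega, show ¬ (10:Int) ≤ l from by omega, show l < (20:Int) from by omega, show ¬ (20:Int) ≤ l from by omega, show l < (30:Int) from by omega, show ¬ (30:Int) ≤ l from by omega, show l < (40:Int) from by omega, show ¬ (40:Int) ≤ l from by omega, show l < (50:Int) from by omega, show ¬ (50:Int) ≤ l from by omega, show l < (60:Int) from by omega, show ¬ (60:Int) ≤ l from by omega, show l < (70:Int) from by omega, show ¬ (70:Int) ≤ l from by omega, show l < (80:Int) from by omega, show ¬ (80:Int) ≤ l from by omega, show l < (90:Int) from by omega, show ¬ (90:Int) ≤ l from by omega, show l < (100:Int) from by omega, show ¬ (100:Int) ≤ l from by omega]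
  by_cases h2 : l < 10
  ·
    simp [loopA, bsLoop, thresholdsB, namesB, itemsList, show (1:Int) ≤ l from by omega, show ¬ l < (1:Int) from by omega, show (5:Int) ≤ l from by omega, show ¬ l < (5:Int) from by omega, show l < (10:Int) from by omega, show ¬ (10:Int) ≤ l from by omega, show l < (20:Int) from by omega, show ¬ (20:Int) ≤ l from by omega, show l < (30:Int) from by omega, show ¬ (30:Int) ≤ l from by omega, show l < (40:Int) from by omega, show ¬ (40:Int) ≤ l from by omega, show l < (50:Int) from by omega, show ¬ (50:Int) ≤ l from by omega, show l < (60:Int) from by omega, show ¬ (60:Int) ≤ l from by omega, show l < (70:Int) from by omega, show ¬ (70:Int) ≤ l from by omega, show l < (80:Int) from by omega, show ¬ (80:Int) ≤ l from by omega, show l < (90:Int) from by omega, show ¬ (90:Int) ≤ l from by omega, show l < (100:Int) from by omega, show ¬ (100:Int) ≤ l from by omega]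
  by_cases h3 : l < 20
  ·
    simp [loopA, bsLoop, thresholdsB, namesB, itemsList, show (1:Int) ≤ l from by omega, show ¬ l < (1:Int) from by omega, show (5:Int) ≤ l from by omega, show ¬ l < (5:Int) from by omega, show (10:Int) ≤ l from by omega, show ¬ l < (10:Int) from by omega, show l < (20:Int) from by omega, show ¬ (20:Int) ≤ l from by omega, show l < (30:Int) from by omega, show ¬ (30:Int) ≤ l from by omega, show l < (40:Int) from by omega, show ¬ (40:Int) ≤ l from by omega, show l < (50:Int) from by omega, show ¬ (50:Int) ≤ l from by omega, show l < (60:Int) from by omega, show ¬ (60:Int) ≤ l from by omega, show l < (70:Int) from by omega, show ¬ (70:Int) ≤ l from by omega, show l < (80:Int) from by omega, show ¬ (80:Int) ≤ l from by omega, show l < (90:Int) from by omega, show ¬ (90:Int) ≤ l from by omega, show l < (100:Int) from by omega, show ¬ (100:Int) ≤ l from by omega]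
  by_cases h4 : l < 30
  ·
    simp [loopA, bsLoop, thresholdsB, namesB, itemsList, show (1:Int) ≤ l from by omega, show ¬ l < (1:Int) from by omega, show (5:Int) ≤ l from by omega, show ¬ l < (5:Int) from by omega, show (10:Int) ≤ l from by omega, show ¬ l < (10:Int) from by omega, show (20:Int) ≤ l from by omega, show ¬ l < (20:Int) from by omega, show l < (30:Int) from by omega, show ¬ (30:Int) ≤ l from by omega, show l < (40:Int) from by omega, show ¬ (40:Int) ≤ l from by omega, show l < (50:Int) from by omega, show ¬ (50:Int) ≤ l from by omega, show l < (60:Int) from by omega, show ¬ (60:Int) ≤ l from by omega, show l < (70:Int) from by omega, show ¬ (70:Int) ≤ l from by omega, show l < (80:Int) from by omega, show ¬ (80:Int) ≤ l from by omega, show l < (90:Int) from by omega, show ¬ (90:Int) ≤ l from by omega, show l < (100:Int) from by omega, show ¬ (100:Int) ≤ l from by omega]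
  by_cases h5 : l < 40
  ·
    simp [loopA, bsLoop, thresholdsB, namesB, itemsList, show (1:Int) ≤ l from by omega, show ¬ l < (1:Int) from by omega, show (5:Int) ≤ l from by omega, show ¬ l < (5:Int) from by omega, show (10:Int) ≤ l from by omega, show ¬ l < (10:Int) from by omega, show (20:Int) ≤ l from by omega, show ¬ l < (20:Int) from by omega, show (30:Int) ≤ l from by omega, show ¬ l < (30:Int) from by omega, show l < (40:Int) from by omega, show ¬ (40:Int) ≤ l from by omega, show l < (50:Int) from by omega, show ¬ (50:Int) ≤ l from by omega, show l < (60:Int) from by omega, show ¬ (60:Int) ≤ l from by omega, show l < (70:Int) from by omega, show ¬ (70:Int) ≤ l from by omega, show l < (80:Int) from by omega, show ¬ (80:Int) ≤ l from by omega, show l < (90:Int) from by omega, show ¬ (90:Int) ≤ l from by omega, show l < (100:Int) from by omega, show ¬ (100:Int) ≤ l from by omega]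
  by_cases h6 : l < 50
  ·
    simp [loopA, bsLoop, thresholdsB, namesB, itemsList, show (1:Int) ≤ l from by omega, show ¬ l < (1:Int) from by omega, show (5:Int) ≤ l from by omega, show ¬ l < (5:Int) from by omega, show (10:Int) ≤ l from by omega, show ¬ l < (10:Int) from by omega, show (20:Int) ≤ l from by omega, show ¬ l < (20:Int) from by omega, show (30:Int) ≤ l from by omega, show ¬ l < (30:Int) from by omega, show (40:Int) ≤ l from by omega, show ¬ l < (40:Int) from by omega, show l < (50:Int) from by omega, show ¬ (50:Int) ≤ l from by omega, show l < (60:Int) from by omega, show ¬ (60:Int) ≤ l from by omega, show l < (70:Int) from by omega, show ¬ (70:Int) ≤ l from by omega, show l < (80:Int) from by omega, show ¬ (80:Int) ≤ l from by omega, show l < (90:Int) from by omega, show ¬ (90:Int) ≤ l from by omega, show l < (100:Int) from by omega, show ¬ (100:Int) ≤ l from by omega]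
  by_cases h7 : l < 60
  ·
    simp [loopA, bsLoop, thresholdsB, namesB, itemsList, show (1:Int) ≤ l from by omega, show ¬ l < (1:Int) from by omega, show (5:Int) ≤ l from by omega, show ¬ l < (5:Int) from by omega, show (10:Int) ≤ l from by omega, show ¬ l < (10:Int) from by omega, show (20:Int) ≤ l from by omega, show ¬ l < (20:Int) from by omega, show (30:Int) ≤ l from by omega, show ¬ l < (30:Int) from by omega, show (40:Int) ≤ l from by omega, show ¬ l < (40:Int) from by omega, show (50:Int) ≤ l from by omega, show ¬ l < (50:Int) from by omega, show l < (60:Int) from by omega, show ¬ (60:Int) ≤ l from by omega, show l < (70:Int) from by omega, show ¬ (70:Int) ≤ l from by omega, show l < (80:Int) from by omega, show ¬ (80:Int) ≤ l from by omega, show l < (90:Int) from by omega, show ¬ (90:Int) ≤ l from by omega, show l < (100:Int) from by omega, show ¬ (100:Int) ≤ l from by omega]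
  by_cases h8 : l < 70
  ·
    simp [loopA, bsLoop, thresholdsB, namesB, itemsList, show (1:Int) ≤ l from by omega, show ¬ l < (1:Int) from by omega, show (5:Int) ≤ l from by omega, show ¬ l < (5:Int) from by omega, show (10:Int) ≤ l from by omega, show ¬ l < (10:Int) from by omega, show (20:Int) ≤ l from by omega, show ¬ l < (20:Int) from by omega, show (30:Int) ≤ l from by omega, show ¬ l < (30:Int) from by omega, show (40:Int) ≤ l from by omega, show ¬ l < (40:Int) from by omega, show (50:Int) ≤ l from by omega, show ¬ l < (50:Int) from by omega, show (60:Int) ≤ l from by omega, show ¬ l < (60:Int) from by omega, show l < (70:Int) from by omega, show ¬ (70:Int) ≤ l from by omega, show l < (80:Int) from by omega, show ¬ (80:Int) ≤ l from by omega, show l < (90:Int) from by omega, show ¬ (90:Int) ≤ l from by omega, show l < (100:Int) from by omega, show ¬ (100:Int) ≤ l from by omega]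
  by_cases h9 : l < 80
  ·
    simp [loopA, bsLoop, thresholdsB, namesB, itemsList, show (1:Int) ≤ l from by omega, show ¬ l < (1:Int) from by omega, show (5:Int) ≤ l from by omega, show ¬ l < (5:Int) from by omega, show (10:Int) ≤ l from by omega, show ¬ l < (10:Int) from by omega, show (20:Int) ≤ l from by omega, show ¬ l < (20:Int) from by omega, show (30:Int) ≤ l from by omega, show ¬ l < (30:Int) from by omega, show (40:Int) ≤ l from by omega, show ¬ l < (40:Int) from by omega, show (50:Int) ≤ l from by omega, show ¬ l < (50:Int) from by omega, show (60:Int) ≤ l from by omega, show ¬ l < (60:Int) from by omega, show (70:Int) ≤ l from by omega, show ¬ l < (70:Int) from by omega, show l < (80:Int) from by omega, show ¬ (80:Int) ≤ l from by omega, show l < (90:Int) from by omega, show ¬ (90:Int) ≤ l from by omega, show l < (100:Int) from by omega, show ¬ (100:Int) ≤ l from by omega]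
  by_cases h10 : l < 90
  ·
    simp [loopA, bsLoop, thresholdsB, namesB, itemsList, show (1:Int) ≤ l from by omega, show ¬ l < (1:Int) from by omega, show (5:Int) ≤ l from by omega, show ¬ l < (5:Int) from by omega, show (10:Int) ≤ l from by omega, show ¬ l < (10:Int) from by omega, show (20:Int) ≤ l from by omega, show ¬ l < (20:Int) from by omega, show (30:Int) ≤ l from by omega, show ¬ l < (30:Int) from by omega, show (40:Int) ≤ l from by omega, show ¬ l < (40:Int) from by omega, show (50:Int) ≤ l from by omega, show ¬ l < (50:Int) from by omega, show (60:Int) ≤ l from by omega, show ¬ l < (60:Int) from by omega, show (70:Int) ≤ l from by omega, show ¬ l < (70:Int) from by omega, show (80:Int) ≤ l from by omega, show ¬ l < (80:Int) from by omega, show l < (90:Int) from by omega, show ¬ (90:Int) ≤ l from by omega, show l < (100:Int) from by omega, show ¬ (100:Int) ≤ l from by omega]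
  by_cases h11 : l < 100
  ·
    simp [loopA, bsLoop, thresholdsB, namesB, itemsList, show (1:Int) ≤ l from by omega, show ¬ l < (1:Int) from by omega, show (5:Int) ≤ l from by omega, show ¬ l < (5:Int) from by omega, show (10:Int) ≤ l from by omega, show ¬ l < (10:Int) from by omega, show (20:Int) ≤ l from by omega, show ¬ l < (20:Int) from by omega, show (30:Int) ≤ l from by omega, show ¬ l < (30:Int) from by omega, show (40:Int) ≤ l from by omega, show ¬ l < (40:Int) from by omega, show (50:Int) ≤ l from by omega, show ¬ l < (50:Int) from by omega, show (60:Int) ≤ l from by omega, show ¬ l < (60:Int) from by omega, show (70:Int) ≤ l from by omega, show ¬ l < (70:Int) from by omega, show (80:Int) ≤ l from by omega, show ¬ l < (80:Int) from by omega, show (90:Int) ≤ l from by omega, show ¬ l < (90:Int) from by omega, show l < (100:Int) from by omega, show ¬ (100:Int) ≤ l from by omega]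
  simp [loopA, bsLoop, thresholdsB, namesB, itemsList, show (1:Int) ≤ l from by omega, show ¬ l < (1:Int) from by omega, show (5:Int) ≤ l from by omega, show ¬ l < (5:Int) from by omega, show (10:Int) ≤ l from by omega, show ¬ l < (10:Int) from by omega, show (20:Int) ≤ l from by omega, show ¬ l < (20:Int) from by omega, show (30:Int) ≤ l from by omega, show ¬ l < (30:Int) from by omega, show (40:Int) ≤ l from by omega, show ¬ l < (40:Int) from by omega, show (50:Int) ≤ l from by omega, show ¬ l < (50:Int) from by omega, show (60:Int) ≤ l from by omega, show ¬ l < (60:Int) from by omega, show (70:Int) ≤ l from by omega, show ¬ l < (70:Int) from by omega, show (80:Int) ≤ l from by omega, show ¬ l < (80:Int) from by omega, show (90:Int) ≤ l from by omega, show ¬ l < (90:Int) from by omega, show (100:Int) ≤ l from by omega, show ¬ l < (100:Int) from by omega]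

-- ===== VERDICT (by name: the statement is the Claim_ definition above) =====
theorem ambil_badge_spec : Claim_equal_ambil_badge := by
  intro xp _
  show ambil_badge xp = ambil_badge_alt xp
  unfold ambil_badge ambil_badge_alt hitung_level
  rw [sorted_items]
  exact core_eq _
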